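-- pv_equiv track=rewrite | github.com/EvgeniyBurdin/django_treensl | treensl/calc_values.py | children_range
-- ===== SOURCE A (Python) =====
-- def children_range (id_e, tree_lv, tree_ch):
--     y = tree_ch+1
--     lv = tree_lv
--     # Найдем уровень элемента
--     for i in range(1, tree_lv):
--         if (id_e % (y**(tree_lv-i))) == 0:
--             lv = i
--             break
--     if lv == tree_lv:
--         return[]
--     # Теперь вернем диапазон возможных детей (первого и последнего)
--     return [id_e+y**(tree_lv-lv-1), id_e-1+((y**(tree_lv-lv-1))*(tree_ch+1))]
-- ===== SOURCE B (Python) =====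
-- def children_range(id_e, tree_lv, tree_ch):
--     y = tree_ch + 1
--     cap = tree_lv - 1
--     # e = multiplicity of y in id_e, capped at tree_lv - 1
--     if id_e == 0 or y == 1 or y == -1:
--         e = max(cap, 0)
--     else:
--         e = 0
--         t = id_e
--         while e < cap and t % y == 0:
--             t //= y
--             e += 1
--     if e <= 0:
--         return []
--     return [id_e + y ** (e - 1), id_e - 1 + y ** e]
-- ===== Notes on version B (the rewrite author's own statement) =====
-- stated objective: faster
-- what changed: Instead of scanning levels i=1..tree_lv-1 and recomputing the big power y**(tree_lv-i) at each step, B counts the multiplicity of y=tree_ch+1 in id_e by repeated exact division (with a direct cap for the always-divisible bases 0, 1, -1) and computes the answer from that exponent.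
import Mathlib
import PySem

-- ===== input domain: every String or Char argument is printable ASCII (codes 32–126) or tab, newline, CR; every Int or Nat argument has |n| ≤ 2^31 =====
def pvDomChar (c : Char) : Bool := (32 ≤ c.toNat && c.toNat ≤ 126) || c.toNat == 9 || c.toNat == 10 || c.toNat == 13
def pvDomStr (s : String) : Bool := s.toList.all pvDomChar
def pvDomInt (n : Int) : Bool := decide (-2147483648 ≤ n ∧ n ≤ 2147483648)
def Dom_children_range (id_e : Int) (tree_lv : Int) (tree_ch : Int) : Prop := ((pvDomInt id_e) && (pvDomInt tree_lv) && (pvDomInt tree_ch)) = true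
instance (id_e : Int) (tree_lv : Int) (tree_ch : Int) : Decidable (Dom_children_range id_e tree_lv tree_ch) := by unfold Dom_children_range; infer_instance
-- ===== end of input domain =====

-- B replaces A's level scan (which recomputes a big power y**(tree_lv-i) per step) by counting
-- the multiplicity of y = tree_ch+1 in id_e via repeated exact division.


-- ===== PORT A =====
-- Literal port of A: scan i = 1 .. tree_lv-1, first i with id_e % (y**(tree_lv-i)) == 0
-- (loop-with-break = find?), default lv = tree_lv.  All reached exponents are ≥ 0, so .toNat is exact.
def children_range (id_e : Int) (tree_lv : Int) (tree_ch : Int) : List Int :=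
  let y := tree_ch + 1
  let lv := ((PySem.List.pyRange 1 tree_lv 1).find?
      (fun i => PySem.Int.mod id_e (y ^ (tree_lv - i).toNat) == 0)).getD tree_lv
  if lv = tree_lv then []
  else [id_e + y ^ (tree_lv - lv - 1).toNat,
        id_e - 1 + (y ^ (tree_lv - lv - 1).toNat) * (tree_ch + 1)]

-- ===== PORT B =====
-- the while loop of Source B: while e < cap and t % y == 0: t //= y; e += 1
def crCount (y : Int) (t : Int) (e : Int) (cap : Int) : Int :=
  if h : e < cap ∧ PySem.Int.mod t y = 0 then
    crCount y (PySem.Int.floordiv t y) (e + 1) cap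
  else e
termination_by (cap - e).toNat
decreasing_by omega

def children_range_alt (id_e : Int) (tree_lv : Int) (tree_ch : Int) : List Int :=
  let y := tree_ch + 1
  let cap := tree_lv - 1
  let e := if id_e = 0 ∨ y = 1 ∨ y = -1 then max cap 0 else crCount y id_e 0 cap
  if e ≤ 0 then []
  else [id_e + y ^ (e - 1).toNat, id_e - 1 + y ^ e.toNat]

-- ===== PRECONDITION & SPEC =====
-- Pre_ excludes exactly tree_ch = -1 with tree_lv ≥ 2, where A raises ZeroDivisionError
-- (the modulus y**(tree_lv-i) is 0**k = 0).
def Pre_children_range (id_e : Int) (tree_lv : Int) (tree_ch : Int) : Prop :=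
  ¬ (tree_ch = -1 ∧ 2 ≤ tree_lv)
instance (id_e : Int) (tree_lv : Int) (tree_ch : Int) : Decidable (Pre_children_range id_e tree_lv tree_ch) := by unfold Pre_children_range; infer_instance

def pvWitness_children_range : Int × Int × Int := (6, 3, 1)

def Spec_children_range (id_e : Int) (tree_lv : Int) (tree_ch : Int) (out : List Int) : Prop := out = children_range_alt id_e tree_lv tree_ch
instance (id_e : Int) (tree_lv : Int) (tree_ch : Int) (out : List Int) : Decidable (Spec_children_range id_e tree_lv tree_ch out) := by unfold Spec_children_range; infer_instance

-- ===== CLAIM (what is proved, stated in full; the proofs are below) =====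
def Claim_equal_children_range : Prop := ∀ (id_e : Int) (tree_lv : Int) (tree_ch : Int), Dom_children_range id_e tree_lv tree_ch → Pre_children_range id_e tree_lv tree_ch → Spec_children_range id_e tree_lv tree_ch (children_range id_e tree_lv tree_ch)

-- ===== LEMMAS AND PROOFS =====

-- find? only looks at the predicate's values on the list's elements
theorem find_congr {α : Type} (p q : α → Bool) (l : List α)
    (h : ∀ x ∈ l, p x = q x) : l.find? p = l.find? q := by
  induction l with
  | nil => rfl
  | cons a t ih =>
    rw [List.find?_cons, List.find?_cons, h a (by simp)]
    cases q a
    · exact ih (fun x hx => h x (by simp [hx]))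
    · rfl

-- first element ≥ c in range(a, b) (for a ≤ c) is c itself, if c < b
theorem find_ge_pyRange (c a b : Int) (hac : a ≤ c) :
    (PySem.List.pyRange a b 1).find? (fun i => decide (c ≤ i)) =
      if c < b then some c else none := by
  by_cases hb : a < b
  · rw [PySem.List.pyRange_one_cons hb, List.find?_cons]
    by_cases hca : c ≤ a
    · have hce : a = c := le_antisymm hac hca
      subst hce
      simp [hb]
    · rw [decide_eq_false (by omega), find_ge_pyRange c (a + 1) b (by omega)]
  · rw [PySem.List.pyRange_one_eq_nil (by omega), List.find?_nil, if_neg (by omega)]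
termination_by (b - a).toNat
decreasing_by omega

-- invariant of Source B's division loop
theorem crCount_spec (y : Int) (hy : y ≠ 0) (cap t e : Int) :
    e ≤ crCount y t e cap ∧ crCount y t e cap ≤ max e cap ∧
    y ^ (crCount y t e cap - e).toNat ∣ t ∧
    (crCount y t e cap < cap → ¬ y ^ (crCount y t e cap - e + 1).toNat ∣ t) := by
  by_cases h : e < cap ∧ PySem.Int.mod t y = 0
  · have hdvd : y ∣ t := (PySem.Int.mod_eq_zero_iff_dvd t y).mp h.2
    have ht : PySem.Int.floordiv t y * y = t := by
      have hfm := PySem.Int.floordiv_mul_add_mod t y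
      rw [h.2, add_zero] at hfm; exact hfm
    rw [crCount, dif_pos h]
    obtain ⟨ih1, ih2, ih3, ih4⟩ := crCount_spec y hy cap (PySem.Int.floordiv t y) (e + 1)
    set r := crCount y (PySem.Int.floordiv t y) (e + 1) cap with hr
    refine ⟨by omega, by omega, ?_, ?_⟩
    · have he : (r - e).toNat = (r - (e + 1)).toNat + 1 := by omega
      rw [he, pow_succ, ← ht]
      exact mul_dvd_mul ih3 dvd_rfl
    · intro hrc hd
      have he : (r - e + 1).toNat = (r - (e + 1) + 1).toNat + 1 := by omega
      rw [he, pow_succ, ← ht] at hd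
      exact ih4 hrc ((mul_dvd_mul_iff_right hy).mp hd)
  · rw [crCount, dif_neg h]
    refine ⟨le_refl e, le_max_left e cap, by simp, ?_⟩
    intro hec hd
    have hm : PySem.Int.mod t y = 0 := by
      apply (PySem.Int.mod_eq_zero_iff_dvd t y).mpr
      have he : (e - e + 1).toNat = 1 := by omega
      rw [he, pow_one] at hd; exact hd
    exact h ⟨hec, hm⟩
termination_by (cap - e).toNat
decreasing_by omega

-- characterization of A's output via the capped exponent E
theorem aChar (id_e L tree_ch E : Int) (hL : 2 ≤ L)
    (hE0 : 0 ≤ E) (hEc : E ≤ L - 1)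
    (hdvd : (tree_ch + 1) ^ E.toNat ∣ id_e)
    (hmax : E < L - 1 → ¬ (tree_ch + 1) ^ (E.toNat + 1) ∣ id_e) :
    children_range id_e L tree_ch =
      if E ≤ 0 then [] else
        [id_e + (tree_ch + 1) ^ (E - 1).toNat, id_e - 1 + (tree_ch + 1) ^ E.toNat] := by
  have hcong : ∀ i ∈ PySem.List.pyRange 1 L 1,
      (PySem.Int.mod id_e ((tree_ch + 1) ^ (L - i).toNat) == 0)
        = decide (L - E ≤ i) := by
    intro i hi
    rw [PySem.List.mem_pyRange_one] at hi
    rw [Bool.eq_iff_iff]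
    simp only [beq_iff_eq, decide_eq_true_eq]
    rw [PySem.Int.mod_eq_zero_iff_dvd]
    constructor
    · intro hd
      by_contra hlt
      have h2 : (tree_ch + 1) ^ (E.toNat + 1) ∣ (tree_ch + 1) ^ (L - i).toNat :=
        pow_dvd_pow _ (by omega)
      exact hmax (by omega) (h2.trans hd)
    · intro hle
      exact (pow_dvd_pow _ (by omega : (L - i).toNat ≤ E.toNat)).trans hdvd
  simp only [children_range]
  rw [find_congr _ _ _ hcong, find_ge_pyRange (L - E) 1 L (by omega)]
  by_cases hE : E ≤ 0
  · rw [if_neg (by omega : ¬ (L - E < L)), if_pos hE]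
    simp
  · rw [if_pos (by omega : L - E < L), if_neg hE]
    simp only [Option.getD_some]
    rw [if_neg (by omega : ¬ (L - E = L))]
    have h1 : L - (L - E) - 1 = E - 1 := by omega
    have h2 : E.toNat = (E - 1).toNat + 1 := by omega
    rw [h1, h2, pow_succ]

-- ===== VERDICT (by name: the statement is the Claim_ definition above) =====
theorem children_range_spec : Claim_equal_children_range := by
  intro id_e L tree_ch _hdom hpre
  unfold Spec_children_range
  by_cases hL : L ≤ 1
  · -- empty level scan on both sides
    simp only [children_range, children_range_alt]
    rw [PySem.List.pyRange_one_eq_nil (by omega), List.find?_nil]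
    rw [crCount, dif_neg (by rintro ⟨h1, -⟩; omega)]
    simp only [Option.getD_none]
    split_ifs with h1 h2 h3 <;> first | rfl | omega
  · have hL2 : 2 ≤ L := by omega
    have hy : tree_ch + 1 ≠ 0 := by
      unfold Pre_children_range at hpre
      intro h; exact hpre ⟨by omega, hL2⟩
    by_cases hb : id_e = 0 ∨ tree_ch + 1 = 1 ∨ tree_ch + 1 = -1
    · -- capped directly: every power divides id_e
      have hdvd : ∀ k : Nat, (tree_ch + 1) ^ k ∣ id_e := by
        intro k
        rcases hb with h0 | h1 | hm1
        · rw [h0]; exact dvd_zero _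
        · rw [h1, one_pow]; exact one_dvd _
        · rw [hm1]; exact ((isUnit_one.neg).pow k).dvd
      simp only [children_range_alt, if_pos hb]
      have hmx : max (L - 1) 0 = L - 1 := by omega
      rw [hmx, aChar id_e L tree_ch (L - 1) hL2 (by omega) (by omega) (hdvd _)
        (by intro hc; omega)]
    · rw [not_or, not_or] at hb
      obtain ⟨ih1, ih2, ih3, ih4⟩ := crCount_spec (tree_ch + 1) hy (L - 1) id_e 0
      set r := crCount (tree_ch + 1) id_e 0 (L - 1) with hr
      have hnot : ¬ (id_e = 0 ∨ tree_ch + 1 = 1 ∨ tree_ch + 1 = -1) := by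
        rintro (h | h | h)
        exacts [hb.1 h, hb.2.1 h, hb.2.2 h]
      simp only [children_range_alt, if_neg hnot, ← hr]
      rw [aChar id_e L tree_ch r hL2 (by omega) (by omega)
        (by have : (r - 0).toNat = r.toNat := by omega
            rw [this] at ih3; exact ih3)
        (by intro hc hd
            apply ih4 hc
            have : (r - 0 + 1).toNat = r.toNat + 1 := by omega
            rw [this]; exact hd)]
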